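-- pv_equiv track=rewrite | github.com/akshin-kuvshin/smth | Олимпиады/2023-2024/ACC Qual/F/F.py | count_inv
-- ===== SOURCE A (Python) =====
-- def count_inv(l):
--     res = 0
--     ones = 0
--     for b in l:
--         if b == 1:
--             ones += 1
--         else: # b == 0
--             res += ones
--     return res
-- ===== SOURCE B (Python) =====
-- def count_inv(l):
--     # prefix[i] = number of ones strictly before position i
--     prefix = []
--     ones = 0
--     for b in l:
--         prefix.append(ones)
--         if b == 1:
--             ones += 1
--     return sum(p for b, p in zip(l, prefix) if b != 1)
-- ===== Notes on version B (the rewrite author's own statement) =====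
-- stated objective: alternative
-- what changed: Replaces A's single-pass running accumulator with a two-phase computation: first build a prefix table of ones-seen-so-far, then sum the table entries at non-1 positions.
import Mathlib
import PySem

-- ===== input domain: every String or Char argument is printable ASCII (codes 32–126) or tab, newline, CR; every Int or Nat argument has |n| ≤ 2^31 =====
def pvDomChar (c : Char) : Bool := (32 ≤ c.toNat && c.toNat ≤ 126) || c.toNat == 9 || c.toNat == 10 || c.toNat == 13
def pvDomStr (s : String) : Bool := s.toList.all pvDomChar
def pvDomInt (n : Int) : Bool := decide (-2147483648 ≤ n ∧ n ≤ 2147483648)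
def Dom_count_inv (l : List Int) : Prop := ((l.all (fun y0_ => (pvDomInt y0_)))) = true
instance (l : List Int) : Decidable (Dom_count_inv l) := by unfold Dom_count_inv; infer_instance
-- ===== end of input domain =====

-- B builds a prefix table of ones-before-each-position, then sums it at non-1 positions; alternative decomposition, same cost.

-- ===== PORT A =====
-- literal port of A's loop: state (res, ones)
def count_inv (l : List Int) : Int :=
  (l.foldl (fun (s : Int × Int) b =>
      if b == 1 then (s.1, s.2 + 1) else (s.1 + s.2, s.2)) (0, 0)).1

-- ===== PORT B =====
-- phase 1: the prefix table (ones strictly before each position), seeded with the running count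
def mkPrefix : List Int → Int → List Int
  | [], _ => []
  | b :: t, ones => ones :: mkPrefix t (if b == 1 then ones + 1 else ones)

-- phase 2: sum of prefix entries at positions whose element is not 1
def count_inv_alt (l : List Int) : Int :=
  ((l.zip (mkPrefix l 0)).filter (fun p => p.1 != 1)).foldl (fun s p => s + p.2) 0

-- ===== PRECONDITION & SPEC =====
def Spec_count_inv (l : List Int) (out : Int) : Prop := out = count_inv_alt l
instance (l : List Int) (out : Int) : Decidable (Spec_count_inv l out) := by unfold Spec_count_inv; infer_instance

-- ===== CLAIM (what is proved, stated in full; the proofs are below) =====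
def Claim_equal_count_inv : Prop := ∀ (l : List Int), Dom_count_inv l → Spec_count_inv l (count_inv l)

-- ===== LEMMAS AND PROOFS =====
theorem sumB_shift (xs : List (Int × Int)) (s : Int) :
    xs.foldl (fun s p => s + p.2) s = s + xs.foldl (fun s p => s + p.2) 0 := by
  induction xs generalizing s with
  | nil => simp
  | cons h t ih => simp only [List.foldl_cons]; rw [ih, ih (0 + h.2)]; ring

theorem count_inv_inv (l : List Int) (res ones : Int) :
    (l.foldl (fun (s : Int × Int) b =>
      if b == 1 then (s.1, s.2 + 1) else (s.1 + s.2, s.2)) (res, ones)).1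
    = res + ((l.zip (mkPrefix l ones)).filter (fun p => p.1 != 1)).foldl
        (fun s p => s + p.2) 0 := by
  induction l generalizing res ones with
  | nil => simp [mkPrefix]
  | cons b t ih =>
    by_cases hb : b = 1
    · subst hb
      exact ih res (ones + 1)
    · have hb' : (b == 1) = false := by simp [hb]
      have h2 : ((b, ones).1 != 1) = true := by simp [hb]
      simp only [List.foldl_cons, mkPrefix, List.zip_cons_cons, List.filter_cons, hb', h2,
        Bool.false_eq_true, if_false, if_true]
      rw [ih, sumB_shift _ (0 + ones)]
      ring

-- ===== VERDICT (by name: the statement is the Claim_ definition above) =====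
theorem count_inv_spec : Claim_equal_count_inv := by
  intro l _
  unfold Spec_count_inv count_inv count_inv_alt
  simpa using count_inv_inv l 0 0
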